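-- pv_equiv track=rewrite | github.com/Mikolmisol/RNAJP-On-Google-Colab | parse2D.py | get_chain_resid
-- ===== SOURCE A (Python) =====
-- def get_chain_resid(seq):
--     seq = seq.strip()
--     chain = "A"
--     dict_resid_chain = {}
--     nt_real_idx = 1
--     nt_idx = 1
--     for i in range(len(seq)):
--         if seq[i] == " ":
--             chain = chr(ord(chain)+1)
--             nt_idx = 1
--             continue
--         dict_resid_chain[str(nt_real_idx)] = (chain,str(nt_idx))
--         nt_idx += 1
--         nt_real_idx += 1
--     return dict_resid_chain
-- ===== SOURCE B (Python) =====
-- def get_chain_resid(seq):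
--     chunks = seq.strip().split(" ")
--     dict_resid_chain = {}
--     real = 1
--     for offset, chunk in enumerate(chunks):
--         letter = chr(ord("A") + offset)
--         for pos, ch in enumerate(chunk, 1):
--             dict_resid_chain[str(real)] = (letter, str(pos))
--             real += 1
--     return dict_resid_chain
-- ===== Notes on version B (the rewrite author's own statement) =====
-- stated objective: alternative
-- what changed: Replaces the flat single-pass state machine (chain letter, per-chain counter and real-index counter updated per character) with a group-then-iterate decomposition: split the stripped sequence on spaces into chain chunks, derive each chain letter from the chunk's enumeration offset and each position from an inner enumeration starting at 1, keeping only one global real-index counter.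
import Mathlib
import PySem

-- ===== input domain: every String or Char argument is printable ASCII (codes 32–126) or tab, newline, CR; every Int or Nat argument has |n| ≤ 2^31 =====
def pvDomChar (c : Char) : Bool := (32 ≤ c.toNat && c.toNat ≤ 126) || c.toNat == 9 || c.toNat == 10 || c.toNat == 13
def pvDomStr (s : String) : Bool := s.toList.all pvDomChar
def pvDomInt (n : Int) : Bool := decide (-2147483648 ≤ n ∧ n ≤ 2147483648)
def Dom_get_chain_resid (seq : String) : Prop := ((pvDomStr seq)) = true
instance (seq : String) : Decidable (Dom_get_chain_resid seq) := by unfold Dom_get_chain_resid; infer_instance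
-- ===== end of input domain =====

-- B regroups A's flat per-character state machine into a split-on-space, enumerate-chunks nested traversal (alternative decomposition, same cost).


-- ===== PORT A =====
-- Loop body of A, taking the current character seq[i].  Python's one-letter string
-- `chain` is carried as its code point (ord(chain)); chr(...) is rebuilt at use.
def pvStepA (st : Nat × PySem.Dict String (String × String) × Int × Int) (c : Char) :
    Nat × PySem.Dict String (String × String) × Int × Int :=
  if c = ' ' then (st.1 + 1, st.2.1, st.2.2.1, (1 : Int))
  else (st.1,
        st.2.1.insert (PySem.Int.toStr st.2.2.1) (String.ofList [Char.ofNat st.1], PySem.Int.toStr st.2.2.2),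
        st.2.2.1 + 1, st.2.2.2 + 1)

def get_chain_resid (seq : String) : List (String × String × String) :=
  (((PySem.List.pyRange 0 (PySem.Str.len (PySem.Str.strip seq)) 1).foldl
      (fun st i => pvStepA st (PySem.List.pyGetD (PySem.Str.strip seq).toList i ' '))
      (65, PySem.Dict.empty, 1, 1)).2.1).items

-- ===== PORT B =====
-- inner loop body of B: one residue of the current chain
def pvStepB (letter : String) (st : PySem.Dict String (String × String) × Int) (pc : Int × Char) :
    PySem.Dict String (String × String) × Int :=
  (st.1.insert (PySem.Int.toStr st.2) (letter, PySem.Int.toStr pc.1), st.2 + 1)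

-- outer loop body of B: one chunk (chain), letter from the enumeration offset
def pvChunkB (st : PySem.Dict String (String × String) × Int) (oc : Int × List Char) :
    PySem.Dict String (String × String) × Int :=
  (PySem.List.enumerate oc.2 1).foldl (pvStepB (String.ofList [Char.ofNat (65 + oc.1).toNat])) st

-- seq.strip().split(" ") is ported as Mathlib's List.splitOn ' ' (same semantics: keeps empty pieces)
def get_chain_resid_alt (seq : String) : List (String × String × String) :=
  (((PySem.List.enumerate ((PySem.Str.strip seq).toList.splitOn ' ') 0).foldl
      pvChunkB (PySem.Dict.empty, 1)).1).items

-- ===== PRECONDITION & SPEC =====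
def Spec_get_chain_resid (seq : String) (out : List (String × String × String)) : Prop := out = get_chain_resid_alt seq
instance (seq : String) (out : List (String × String × String)) : Decidable (Spec_get_chain_resid seq out) := by unfold Spec_get_chain_resid; infer_instance

-- ===== CLAIM (what is proved, stated in full; the proofs are below) =====
def Claim_equal_get_chain_resid : Prop := ∀ (seq : String), Dom_get_chain_resid seq → Spec_get_chain_resid seq (get_chain_resid seq)

-- ===== LEMMAS AND PROOFS =====

-- pieces produced by splitOnP contain no element satisfying p
theorem pv_splitOnP_no_sep {α : Type} (p : α → Bool) :
    ∀ (xs : List α), ∀ l ∈ xs.splitOnP p, ∀ a ∈ l, ¬ p a = true := by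
  intro xs
  induction xs with
  | nil => intro l hl a ha; simp [List.splitOnP_nil] at hl; subst hl; simp at ha
  | cons x t ih =>
    intro l hl a ha
    rw [List.splitOnP_cons] at hl
    by_cases hx : p x
    · rw [if_pos hx] at hl
      rcases List.mem_cons.mp hl with hl | hl
      · subst hl; simp at ha
      · exact ih l hl a ha
    · rw [if_neg hx] at hl
      rcases h' : t.splitOnP p with - | ⟨hd, tl⟩
      · exact absurd h' (List.splitOnP_ne_nil p t)
      · rw [h'] at hl
        simp only [List.modifyHead] at hl
        rcases List.mem_cons.mp hl with hl | hl
        · subst hl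
          rcases List.mem_cons.mp ha with ha | ha
          · subst ha; exact hx
          · exact ih hd (by rw [h']; exact List.mem_cons_self) a ha
        · exact ih l (by rw [h']; exact List.mem_cons_of_mem _ hl) a ha

-- A's fold over one space-free chunk, against B's inner enumerate fold
theorem pv_inner (chunk : List Char) (h : ' ' ∉ chunk) (code : Nat) :
    ∀ (d : PySem.Dict String (String × String)) (real idx : Int),
      chunk.foldl pvStepA (code, d, real, idx) =
        (code,
         ((PySem.List.enumerate chunk idx).foldl (pvStepB (String.ofList [Char.ofNat code])) (d, real)).1,
         ((PySem.List.enumerate chunk idx).foldl (pvStepB (String.ofList [Char.ofNat code])) (d, real)).2,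
         idx + (chunk.length : Int)) := by
  induction chunk with
  | nil => intro d real idx; simp [PySem.List.enumerate]
  | cons c t ih =>
    intro d real idx
    have hc : c ≠ ' ' := fun hc => h (hc ▸ List.mem_cons_self)
    have ht : ' ' ∉ t := fun hm => h (List.mem_cons_of_mem _ hm)
    simp only [List.foldl_cons, pvStepA, if_neg hc, PySem.List.enumerate, pvStepB]
    rw [ih ht]
    simp only [Prod.mk.injEq, List.length_cons]
    refine ⟨by trivial, by trivial, by trivial, ?_⟩
    push_cast; ring

-- A's fold over the whole (intercalated) sequence, against B's outer enumerate fold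
theorem pv_outer :
    ∀ (chunks : List (List Char)), (∀ l ∈ chunks, ' ' ∉ l) →
    ∀ (k : Nat) (d : PySem.Dict String (String × String)) (real : Int),
      ((((List.intercalate [' '] chunks).foldl pvStepA (65 + k, d, real, 1)).2.1),
       (((List.intercalate [' '] chunks).foldl pvStepA (65 + k, d, real, 1)).2.2.1))
        = (PySem.List.enumerate chunks (k : Int)).foldl pvChunkB (d, real) := by
  intro chunks
  induction chunks with
  | nil => intro _ k d real; simp [List.intercalate, PySem.List.enumerate]
  | cons a rest ih =>
    intro h k d real
    have ha : ' ' ∉ a := h a List.mem_cons_self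
    have hcast : ((65 : Int) + (k : Int)).toNat = 65 + k := by omega
    cases rest with
    | nil =>
      have hsingle : List.intercalate [' '] [a] = a := by
        simp [List.intercalate, List.intersperse]
      rw [hsingle, pv_inner a ha (65 + k)]
      simp [PySem.List.enumerate, pvChunkB, hcast]
    | cons b t =>
      have hconc : List.intercalate [' '] (a :: b :: t) =
          a ++ ' ' :: List.intercalate [' '] (b :: t) := by
        simp [List.intercalate, List.intersperse]
      rw [hconc, List.foldl_append, pv_inner a ha (65 + k), List.foldl_cons]
      have hsp : pvStepA
          (65 + k,
           ((PySem.List.enumerate a 1).foldl (pvStepB (String.ofList [Char.ofNat (65 + k)])) (d, real)).1,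
           ((PySem.List.enumerate a 1).foldl (pvStepB (String.ofList [Char.ofNat (65 + k)])) (d, real)).2,
           (1 : Int) + (a.length : Int)) ' '
          = (65 + (k + 1),
             ((PySem.List.enumerate a 1).foldl (pvStepB (String.ofList [Char.ofNat (65 + k)])) (d, real)).1,
             ((PySem.List.enumerate a 1).foldl (pvStepB (String.ofList [Char.ofNat (65 + k)])) (d, real)).2,
             (1 : Int)) := by
        simp [pvStepA] <;> omega
      rw [hsp]
      have hrest : ∀ l ∈ b :: t, ' ' ∉ l := fun l hl => h l (List.mem_cons_of_mem _ hl)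
      rw [ih hrest (k + 1)]
      have henum : PySem.List.enumerate (a :: b :: t) (k : Int)
          = ((k : Int), a) :: PySem.List.enumerate (b :: t) ((k : Int) + 1) := by
        simp [PySem.List.enumerate]
      rw [henum, List.foldl_cons]
      have : pvChunkB (d, real) ((k : Int), a)
          = (PySem.List.enumerate a 1).foldl (pvStepB (String.ofList [Char.ofNat (65 + k)])) (d, real) := by
        simp [pvChunkB, hcast]
      rw [this]
      push_cast
      rfl

-- ===== VERDICT (by name: the statement is the Claim_ definition above) =====
theorem get_chain_resid_spec : Claim_equal_get_chain_resid := by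
  intro seq _
  unfold Spec_get_chain_resid get_chain_resid get_chain_resid_alt
  rw [PySem.Str.len_eq]
  generalize (PySem.Str.strip seq).toList = cs
  rw [PySem.List.foldl_pyRange_zero_pyGetD' cs ' ' pvStepA (65, PySem.Dict.empty, 1, 1)]
  have hns : ∀ l ∈ List.splitOn ' ' cs, ' ' ∉ l := by
    intro l hl hm
    exact pv_splitOnP_no_sep (· == ' ') cs l hl ' ' hm (by simp)
  have hfst : ((List.intercalate [' '] (List.splitOn ' ' cs)).foldl pvStepA
        (65, PySem.Dict.empty, 1, 1)).2.1
      = ((PySem.List.enumerate (List.splitOn ' ' cs) 0).foldl pvChunkB (PySem.Dict.empty, 1)).1 :=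
    congrArg Prod.fst (pv_outer (List.splitOn ' ' cs) hns 0 PySem.Dict.empty 1)
  conv_lhs => rw [← List.intercalate_splitOn cs ' ']
  rw [hfst]
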